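-- pv_equiv track=rewrite | github.com/TheNDCC/AdventCfCode | 2025/dia3/dia3b.py | sumar_joltages_por_banco
-- ===== SOURCE A (Python) =====
-- def max_subsequence_of_length_k(s: str, k: int) -> str:
--     """
--     Devuelve la subsecuencia (manteniendo orden) de longitud k
--     que forma el mayor número posible. Implementación O(n) con pila.
--     s: cadena de dígitos
--     k: longitud objetivo (aquí 12)
--     """
--     n = len(s)
--     if k > n:
--         raise ValueError(f"La línea tiene longitud {n} < {k}; no se puede elegir {k} dígitos")
--
--     to_remove = n - k  # cuántos dígitos podemos quitar
--     stack = []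
--
--     for ch in s:
--         # mientras podamos quitar y el último dígito en stack sea menor
--         # que el actual, lo quitamos para obtener un número mayor
--         while to_remove and stack and stack[-1] < ch:
--             stack.pop()
--             to_remove -= 1
--         stack.append(ch)
--
--     # si queda por quitar (caso decreciente), recortamos desde el final
--     if to_remove:
--         stack = stack[:-to_remove]
--
--     # tomar exactamente k dígitos
--     result = ''.join(stack[:k])
--     return result
--
-- def sumar_joltages_por_banco(lines, k=12):
--     """
--     Para cada línea de dígitos (un banco), toma la subsecuencia máxima de longitud k,
--     la interpreta como entero y suma todas.
--     Devuelve (suma_total, lista_de_valores_por_linea) para comodidad.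
--     """
--     total = 0
--     valores = []
--     for idx, line in enumerate(lines, start=1):
--         s = line.strip()
--         if not s:
--             continue
--         mayor_str = max_subsequence_of_length_k(s, k)
--         mayor_int = int(mayor_str)
--         valores.append((idx, mayor_str, mayor_int))
--         total += mayor_int
--     return total, valores
-- ===== SOURCE B (Python) =====
-- def max_subsequence_of_length_k(s: str, k: int) -> str:
--     """Greedy window-max selection: for each output position pick the leftmost
--     maximum digit of the window that still leaves enough characters for the rest."""
--     n = len(s)
--     if k > n:
--         raise ValueError(f"La línea tiene longitud {n} < {k}; no se puede elegir {k} dígitos")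
--     res = []
--     start = 0
--     produced = 0
--     while produced < k:
--         end = n - (k - produced - 1)   # window s[start:end] leaves k-produced-1 chars after it
--         best = start
--         j = start + 1
--         while j < end:
--             if s[j] > s[best]:
--                 best = j
--             j += 1
--         res.append(s[best])
--         start = best + 1
--         produced += 1
--     return ''.join(res)
--
-- def sumar_joltages_por_banco(lines, k=12):
--     valores = []
--     for idx, line in enumerate(lines, start=1):
--         s = line.strip()
--         if s:
--             m = max_subsequence_of_length_k(s, k)
--             valores.append((idx, m, int(m)))
--     total = sum(v for _, _, v in valores)
--     return total, valores
-- ===== Notes on version B (the rewrite author's own statement) =====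
-- stated objective: alternative
-- what changed: max_subsequence_of_length_k is rebuilt as the classic greedy window-max selection (for each of the k output positions scan the remaining feasible window for its leftmost maximum and jump past it) instead of the single-pass monotonic stack with a pop budget; the per-line driver collects the triples with a filter-style loop and sums at the end.
-- outside the precondition, e.g. on sumar_joltages_por_banco(['+12'], 2): A returns (12, [(1, '12', 12)]), B returns (12, [(1, '12', 12)])
import Mathlib
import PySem

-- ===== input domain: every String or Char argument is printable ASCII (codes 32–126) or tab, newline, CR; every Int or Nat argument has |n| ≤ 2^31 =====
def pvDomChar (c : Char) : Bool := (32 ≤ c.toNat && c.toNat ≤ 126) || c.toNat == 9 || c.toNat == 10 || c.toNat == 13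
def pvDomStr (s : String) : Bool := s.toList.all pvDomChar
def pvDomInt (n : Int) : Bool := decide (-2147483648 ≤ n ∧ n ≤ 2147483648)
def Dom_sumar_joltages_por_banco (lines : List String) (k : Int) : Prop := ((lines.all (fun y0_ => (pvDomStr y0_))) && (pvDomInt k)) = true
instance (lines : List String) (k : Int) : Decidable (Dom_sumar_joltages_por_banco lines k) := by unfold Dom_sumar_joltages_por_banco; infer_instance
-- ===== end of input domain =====

-- B re-implements the per-line maximum k-subsequence by greedy window-max selection
-- instead of A's monotonic stack with a pop budget (alternative algorithm, same values).


-- ===== PORT A =====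
-- `while to_remove and stack and stack[-1] < ch: stack.pop(); to_remove -= 1`
-- (the stack is held top-first, i.e. as the reverse of the Python list)
def popWhileA : List Char → Int → Char → List Char × Int
  | [], r, _ => ([], r)
  | t :: rest, r, c => if r ≠ 0 ∧ t < c then popWhileA rest (r - 1) c else (t :: rest, r)

-- `for ch in s: <pop phase>; stack.append(ch)`
def stackLoopA : List Char → List Char → Int → List Char × Int
  | [], rst, r => (rst, r)
  | c :: cs, rst, r =>
    let p := popWhileA rst r c
    stackLoopA cs (c :: p.1) p.2

-- max_subsequence_of_length_k; the `if k > n: raise ValueError` guard is excluded by Pre_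
def maxSubseqA (s : List Char) (k : Int) : List Char :=
  let p := stackLoopA s [] ((s.length : Int) - k)
  let stack := p.1.reverse
  let stack' := if p.2 ≠ 0 then PySem.List.slice stack none (some (-p.2)) else stack  -- stack[:-to_remove]
  PySem.List.slice stack' none (some k)  -- stack[:k]

-- the body of A's `for idx, line in enumerate(lines, start=1)` loop
def lineStepA (k : Int) (acc : Int × List (Int × String × Int)) (p : Int × String) :
    Int × List (Int × String × Int) :=
  let s := (PySem.Str.strip p.2).toList
  if s = [] then acc  -- `if not s: continue`
  else
    let mayor := maxSubseqA s k
    let v := (PySem.Int.ofChars? mayor).getD 0  -- int(mayor_str); none = ValueError, excluded by Pre_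
    (acc.1 + v, acc.2 ++ [(p.1, String.ofList mayor, v)])

def sumar_joltages_por_banco (lines : List String) (k : Int) : Int × (List (Int × String × Int)) :=
  (PySem.List.enumerate lines 1).foldl (lineStepA k) (0, [])

-- ===== PORT B =====
-- inner `while j < end: if s[j] > s[best]: best = j; j += 1`  (indices are nonnegative, held as Nat)
def argmaxFromB (s : List Char) (best j stop : Nat) : Nat :=
  if j < stop then
    argmaxFromB s (if s.getD best ' ' < s.getD j ' ' then j else best) (j + 1) stop
  else best
termination_by stop - j

-- outer `while produced < k: ... res.append(s[best]); start = best + 1`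
def greedyLoopB (s : List Char) (n start produced kk : Nat) (acc : List Char) : List Char :=
  if produced < kk then
    let b := argmaxFromB s start (start + 1) (n - (kk - produced - 1))
    greedyLoopB s n (b + 1) (produced + 1) kk (acc ++ [s.getD b ' '])
  else acc
termination_by kk - produced

-- max_subsequence_of_length_k (B); the `if k > n: raise ValueError` guard is excluded by Pre_;
-- `while produced < k` runs k.toNat times (none at all for k ≤ 0, exactly like Python)
def maxSubseqB (s : List Char) (k : Int) : List Char :=
  greedyLoopB s s.length 0 0 k.toNat []

-- the body of B's per-line collection
def lineValB (k : Int) (p : Int × String) : Option (Int × String × Int) :=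
  let s := (PySem.Str.strip p.2).toList
  if s = [] then none
  else
    let m := maxSubseqB s k
    some (p.1, String.ofList m, (PySem.Int.ofChars? m).getD 0)

def sumar_joltages_por_banco_alt (lines : List String) (k : Int) : Int × (List (Int × String × Int)) :=
  let valores := (PySem.List.enumerate lines 1).filterMap (lineValB k)
  (valores.foldl (fun t v => t + v.2.2) 0, valores)

-- ===== PRECONDITION & SPEC =====
-- Pre_ restricts every non-blank stripped line to pure digit characters with 1 ≤ k ≤ its length:
-- outside this A raises (ValueError from `int` on a non-digit or empty subsequence, or from k > len),
-- except for a few sign/space-prefixed lines (e.g. (['+12'], 2)) where A still returns and B agrees.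
def Pre_sumar_joltages_por_banco (lines : List String) (k : Int) : Prop :=
  ∀ l ∈ lines, (PySem.Str.strip l).toList = [] ∨
    (((PySem.Str.strip l).toList.all Char.isDigit) = true ∧ 1 ≤ k ∧ k ≤ (((PySem.Str.strip l).toList.length : Nat) : Int))
instance (lines : List String) (k : Int) : Decidable (Pre_sumar_joltages_por_banco lines k) := by
  unfold Pre_sumar_joltages_por_banco; infer_instance

def pvWitness_sumar_joltages_por_banco : List String × Int := (["934159", " 27 ", ""], 2)

def Spec_sumar_joltages_por_banco (lines : List String) (k : Int) (out : Int × (List (Int × String × Int))) : Prop := out = sumar_joltages_por_banco_alt lines k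
instance (lines : List String) (k : Int) (out : Int × (List (Int × String × Int))) : Decidable (Spec_sumar_joltages_por_banco lines k out) := by unfold Spec_sumar_joltages_por_banco; infer_instance

-- ===== CLAIM (what is proved, stated in full; the proofs are below) =====
def Claim_equal_sumar_joltages_por_banco : Prop := ∀ (lines : List String) (k : Int), Dom_sumar_joltages_por_banco lines k → Pre_sumar_joltages_por_banco lines k → Spec_sumar_joltages_por_banco lines k (sumar_joltages_por_banco lines k)

-- ===== LEMMAS AND PROOFS =====

-- the greedy selection both algorithms compute, by recursion on the output length
def Gsel : List Char → Nat → List Char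
  | _, 0 => []
  | s, k' + 1 =>
    let m := argmaxFromB s 0 1 (s.length - k')
    s.getD m ' ' :: Gsel (s.drop (m + 1)) k'

theorem pv_getD_drop (s : List Char) (d i : Nat) (c : Char) :
    (s.drop d).getD i c = s.getD (d + i) c := by
  simp [List.getD, List.getElem?_drop]

theorem pv_argmax_unfold (s : List Char) (b j stop : Nat) :
    argmaxFromB s b j stop =
      if j < stop then argmaxFromB s (if s.getD b ' ' < s.getD j ' ' then j else b) (j + 1) stop
      else b := by
  rw [argmaxFromB]

-- scanning a window of s shifted by d is scanning the window of s.drop d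
theorem pv_argmax_shift (s : List Char) (d : Nat) :
    ∀ (fuel b j stop : Nat), stop - j ≤ fuel →
      argmaxFromB s (d + b) (d + j) (d + stop) = d + argmaxFromB (s.drop d) b j stop := by
  intro fuel
  induction fuel with
  | zero =>
    intro b j stop hf
    rw [pv_argmax_unfold s, pv_argmax_unfold (s.drop d), if_neg (by omega), if_neg (by omega : ¬ j < stop)]
  | succ n ih =>
    intro b j stop hf
    by_cases hj : j < stop
    · rw [pv_argmax_unfold s, pv_argmax_unfold (s.drop d), if_pos (by omega : d + j < d + stop), if_pos hj,
        pv_getD_drop s d b, pv_getD_drop s d j]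
      by_cases hc : s.getD (d + b) ' ' < s.getD (d + j) ' '
      · rw [if_pos hc, if_pos hc]
        exact ih j (j + 1) stop (by omega)
      · rw [if_neg hc, if_neg hc]
        exact ih b (j + 1) stop (by omega)
    · rw [pv_argmax_unfold s, pv_argmax_unfold (s.drop d), if_neg (by omega), if_neg hj]

-- the scan returns the leftmost maximum over {b} ∪ [j, stop)
theorem pv_argmax_spec (s : List Char) (stop : Nat) :
    ∀ (fuel j b : Nat), stop - j ≤ fuel → b < j → b < stop →
      b ≤ argmaxFromB s b j stop ∧ argmaxFromB s b j stop < stop ∧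
      (∀ i, (i = b ∨ (j ≤ i ∧ i < stop)) → s.getD i ' ' ≤ s.getD (argmaxFromB s b j stop) ' ') ∧
      (∀ i, (i = b ∨ j ≤ i) → i < argmaxFromB s b j stop → s.getD i ' ' < s.getD (argmaxFromB s b j stop) ' ') := by
  intro fuel
  induction fuel with
  | zero =>
    intro j b hf hbj hbs
    rw [pv_argmax_unfold, if_neg (by omega)]
    refine ⟨le_refl _, hbs, ?_, ?_⟩
    · intro i hi
      rcases hi with rfl | ⟨h1, h2⟩
      · exact le_refl _
      · omega
    · intro i hi hlt
      rcases hi with rfl | h1 <;> omega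
  | succ n ih =>
    intro j b hf hbj hbs
    by_cases hj : j < stop
    · rw [pv_argmax_unfold, if_pos hj]
      by_cases hc : s.getD b ' ' < s.getD j ' '
      · rw [if_pos hc]
        obtain ⟨h1, h2, h3, h4⟩ := ih (j + 1) j (by omega) (by omega) hj
        refine ⟨by omega, h2, ?_, ?_⟩
        · intro i hi
          rcases hi with rfl | ⟨hji, his⟩
          · exact le_of_lt (lt_of_lt_of_le hc (h3 j (Or.inl rfl)))
          · by_cases hij : i = j
            · subst hij; exact h3 i (Or.inl rfl)
            · exact h3 i (Or.inr ⟨by omega, his⟩)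
        · intro i hi hlt
          rcases hi with rfl | hji
          · exact lt_of_lt_of_le hc (h3 j (Or.inl rfl))
          · by_cases hij : i = j
            · subst hij; exact h4 i (Or.inl rfl) hlt
            · exact h4 i (Or.inr (by omega)) hlt
      · rw [if_neg hc]
        obtain ⟨h1, h2, h3, h4⟩ := ih (j + 1) b (by omega) (by omega) hbs
        refine ⟨h1, h2, ?_, ?_⟩
        · intro i hi
          rcases hi with rfl | ⟨hji, his⟩
          · exact h3 i (Or.inl rfl)
          · by_cases hij : i = j
            · subst hij; exact le_trans (le_of_not_gt hc) (h3 b (Or.inl rfl))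
            · exact h3 i (Or.inr ⟨by omega, his⟩)
        · intro i hi hlt
          rcases hi with rfl | hji
          · exact h4 i (Or.inl rfl) hlt
          · by_cases hij : i = j
            · subst hij
              exact lt_of_le_of_lt (le_of_not_gt hc) (h4 b (Or.inl rfl) (by omega))
            · exact h4 i (Or.inr (by omega)) hlt
    · rw [pv_argmax_unfold, if_neg hj]
      refine ⟨le_refl _, hbs, ?_, ?_⟩
      · intro i hi
        rcases hi with rfl | ⟨h1, h2⟩
        · exact le_refl _
        · omega
      · intro i hi hlt
        rcases hi with rfl | h1 <;> omega

theorem pv_greedy_unfold (s : List Char) (n start produced kk : Nat) (acc : List Char) :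
    greedyLoopB s n start produced kk acc =
      if produced < kk then
        greedyLoopB s n (argmaxFromB s start (start + 1) (n - (kk - produced - 1)) + 1) (produced + 1) kk
          (acc ++ [s.getD (argmaxFromB s start (start + 1) (n - (kk - produced - 1))) ' '])
      else acc := by
  rw [greedyLoopB]

-- B's outer loop computes Gsel of the still-unscanned suffix
theorem pv_greedy_eq (s : List Char) :
    ∀ (fuel start produced kk : Nat) (acc : List Char), kk - produced ≤ fuel →
      kk - produced ≤ s.length - start → start ≤ s.length →
      greedyLoopB s s.length start produced kk acc = acc ++ Gsel (s.drop start) (kk - produced) := by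
  intro fuel
  induction fuel with
  | zero =>
    intro start produced kk acc hf _ _
    rw [pv_greedy_unfold, if_neg (by omega), show kk - produced = 0 from by omega]
    simp [Gsel]
  | succ nfuel ih =>
    intro start produced kk acc hf hwin hsl
    by_cases hlt : produced < kk
    · obtain ⟨k', hk'⟩ : ∃ k', kk - produced = k' + 1 := ⟨kk - produced - 1, by omega⟩
      have hk1 : kk - produced - 1 = k' := by omega
      have hlen : (s.drop start).length = s.length - start := by simp
      have hstop : s.length - (kk - produced - 1) = start + ((s.length - start) - k') := by omega
      have hshift := pv_argmax_shift s start ((s.length - start) - k') 0 1 ((s.length - start) - k') (by omega)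
      rw [Nat.add_zero] at hshift
      have hspec := pv_argmax_spec (s.drop start) ((s.length - start) - k')
        ((s.length - start) - k') 1 0 (by omega) (by omega) (by omega)
      set m := argmaxFromB (s.drop start) 0 1 ((s.length - start) - k') with hm
      rw [pv_greedy_unfold, if_pos hlt, hstop, hshift]
      have hGsel : Gsel (s.drop start) (kk - produced) =
          (s.drop start).getD m ' ' :: Gsel ((s.drop start).drop (m + 1)) k' := by
        rw [hk']
        simp only [Gsel, hlen]
        rw [← hm]
      rw [hGsel]
      have hrec := ih (start + m + 1) (produced + 1) kk (acc ++ [s.getD (start + m) ' '])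
        (by omega) (by omega) (by omega)
      rw [show s.drop (start + m + 1) = (s.drop start).drop (m + 1) from by
          rw [List.drop_drop]; ring_nf] at hrec
      rw [show kk - (produced + 1) = k' from by omega] at hrec
      rw [hrec, pv_getD_drop]
      simp
    · rw [pv_greedy_unfold, if_neg hlt, show kk - produced = 0 from by omega]
      simp [Gsel]

theorem pv_B_eq_G (s : List Char) (kN : Nat) (h : kN ≤ s.length) :
    maxSubseqB s (kN : Int) = Gsel s kN := by
  unfold maxSubseqB
  rw [Int.toNat_natCast]
  rw [pv_greedy_eq s kN 0 0 kN [] (by omega) (by omega) (by omega)]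
  simp

theorem pv_pop_len (c : Char) : ∀ (xs : List Char) (r : Int),
    ((popWhileA xs r c).1.length : Int) - xs.length = (popWhileA xs r c).2 - r := by
  intro xs
  induction xs with
  | nil => intro r; simp [popWhileA]
  | cons t rest ih =>
    intro r
    rw [popWhileA]
    split_ifs with h
    · have := ih (r - 1); simp only [List.length_cons] at this ⊢; push_cast at this ⊢; omega
    · simp

theorem pv_pop_suffix (c : Char) : ∀ (xs : List Char) (r : Int), (popWhileA xs r c).1 <:+ xs := by
  intro xs
  induction xs with
  | nil => intro r; simp [popWhileA]
  | cons t rest ih =>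
    intro r
    rw [popWhileA]
    split_ifs with h
    · exact (ih (r - 1)).trans (List.suffix_cons t rest)
    · exact List.suffix_rfl

theorem pv_pop_nonneg (c : Char) : ∀ (xs : List Char) (r : Int), 0 ≤ r → 0 ≤ (popWhileA xs r c).2 := by
  intro xs
  induction xs with
  | nil => intro r h; simpa [popWhileA] using h
  | cons t rest ih =>
    intro r h
    rw [popWhileA]
    split_ifs with hc
    · exact ih (r - 1) (by omega)
    · exact h

theorem pv_pop_all (c : Char) : ∀ (xs : List Char) (r : Int),
    (∀ x ∈ xs, x < c) → (xs.length : Int) ≤ r → popWhileA xs r c = ([], r - xs.length) := by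
  intro xs
  induction xs with
  | nil => intro r _ _; simp [popWhileA]
  | cons t rest ih =>
    intro r hall hlen
    rw [popWhileA]
    simp only [List.length_cons] at hlen
    have h1 : r ≠ 0 ∧ t < c := by
      refine ⟨by push_cast at hlen; omega, hall t (by simp)⟩
    rw [if_pos h1, ih (r - 1) (fun x hx => hall x (by simp [hx])) (by push_cast at hlen ⊢; omega)]
    simp only [List.length_cons]
    push_cast
    congr 1
    omega

theorem pv_pop_append (c b : Char) : ∀ (xs : List Char) (r : Int),
    popWhileA (xs ++ [b]) r c =
      if (popWhileA xs r c).1 = [] ∧ (popWhileA xs r c).2 ≠ 0 ∧ b < c then ([], (popWhileA xs r c).2 - 1)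
      else ((popWhileA xs r c).1 ++ [b], (popWhileA xs r c).2) := by
  intro xs
  induction xs with
  | nil =>
    intro r
    have hstep : popWhileA ([] ++ [b]) r c = if r ≠ 0 ∧ b < c then ([], r - 1) else ([b], r) := by
      rw [List.nil_append, popWhileA]
      split_ifs with h <;> simp [popWhileA]
    rw [hstep, show popWhileA ([] : List Char) r c = ([], r) from rfl]
    split_ifs with h1 h2 h2 <;> simp_all
  | cons t rest ih =>
    intro r
    by_cases h : r ≠ 0 ∧ t < c
    · rw [List.cons_append, popWhileA, if_pos h, ih (r - 1),
        show popWhileA (t :: rest) r c = popWhileA rest (r - 1) c from by rw [popWhileA, if_pos h]]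
    · rw [List.cons_append, popWhileA, if_neg h,
        show popWhileA (t :: rest) r c = (t :: rest, r) from by rw [popWhileA, if_neg h]]
      simp

theorem pv_stack_concat (ys : List Char) : ∀ (xs rst : List Char) (r : Int),
    stackLoopA (xs ++ ys) rst r = stackLoopA ys (stackLoopA xs rst r).1 (stackLoopA xs rst r).2 := by
  intro xs
  induction xs with
  | nil => intro rst r; simp [stackLoopA]
  | cons x xs ih =>
    intro rst r
    simp only [List.cons_append, stackLoopA]
    exact ih _ _

theorem pv_stack_len : ∀ (cs rst : List Char) (r : Int),
    ((stackLoopA cs rst r).1.length : Int) - (rst.length + cs.length) = (stackLoopA cs rst r).2 - r := by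
  intro cs
  induction cs with
  | nil => intro rst r; simp [stackLoopA]
  | cons c cs ih =>
    intro rst r
    simp only [stackLoopA]
    have h1 := ih (c :: (popWhileA rst r c).1) (popWhileA rst r c).2
    have h2 := pv_pop_len c rst r
    simp only [List.length_cons] at h1 h2 ⊢
    push_cast at h1 h2 ⊢
    omega

theorem pv_stack_nonneg : ∀ (cs rst : List Char) (r : Int), 0 ≤ r → 0 ≤ (stackLoopA cs rst r).2 := by
  intro cs
  induction cs with
  | nil => intro rst r h; exact h
  | cons c cs ih =>
    intro rst r h
    simp only [stackLoopA]
    exact ih _ _ (pv_pop_nonneg c rst r h)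

theorem pv_stack_mem : ∀ (cs rst : List Char) (r : Int) (x : Char),
    x ∈ (stackLoopA cs rst r).1 → x ∈ rst ∨ x ∈ cs := by
  intro cs
  induction cs with
  | nil => intro rst r x h; exact Or.inl h
  | cons c cs ih =>
    intro rst r x h
    simp only [stackLoopA] at h
    rcases ih _ _ _ h with h' | h'
    · rcases List.mem_cons.mp h' with rfl | h''
      · exact Or.inr (by simp)
      · exact Or.inl ((pv_pop_suffix c rst r).subset h'')
    · exact Or.inr (by simp [h'])

-- a bottom element too large to be popped within the budget stays put and changes nothing
theorem pv_stack_bottom (b : Char) : ∀ (cs rst : List Char) (r : Int), 0 ≤ r →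
    (∀ (j : Nat) (c' : Char), cs[j]? = some c' → (rst.length : Int) + j + 1 ≤ r → ¬ b < c') →
    stackLoopA cs (rst ++ [b]) r = ((stackLoopA cs rst r).1 ++ [b], (stackLoopA cs rst r).2) := by
  intro cs
  induction cs with
  | nil => intro rst r _ _; simp [stackLoopA]
  | cons c cs ih =>
    intro rst r hr H
    simp only [stackLoopA]
    rw [pv_pop_append c b rst r]
    by_cases hbad : (popWhileA rst r c).1 = [] ∧ (popWhileA rst r c).2 ≠ 0 ∧ b < c
    · exfalso
      have hlen := pv_pop_len c rst r
      rw [hbad.1] at hlen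
      simp at hlen
      have hnn := pv_pop_nonneg c rst r hr
      have : (rst.length : Int) + 0 + 1 ≤ r := by omega
      exact H 0 c (by simp) this hbad.2.2
    · rw [if_neg hbad]
      have hlen := pv_pop_len c rst r
      have hnn := pv_pop_nonneg c rst r hr
      have := ih (c :: (popWhileA rst r c).1) (popWhileA rst r c).2 hnn (by
        intro j c' hj hle
        refine H (j + 1) c' (by simpa using hj) ?_
        simp only [List.length_cons] at hle
        push_cast at hle ⊢
        omega)
      rw [show (c :: (popWhileA rst r c).1) ++ [b] = c :: ((popWhileA rst r c).1 ++ [b]) from rfl] at this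
      exact this

-- A's result is the final stack with the leftover budget dropped from the top, reversed back
theorem pv_resform (s : List Char) (kN : Nat) (h : kN ≤ s.length) :
    maxSubseqA s (kN : Int) =
      ((stackLoopA s [] ((s.length : Int) - (kN : Int))).1.drop
        (stackLoopA s [] ((s.length : Int) - (kN : Int))).2.toNat).reverse := by
  unfold maxSubseqA
  have hlen := pv_stack_len s [] ((s.length : Int) - (kN : Int))
  have hnn := pv_stack_nonneg s [] ((s.length : Int) - (kN : Int)) (by omega)
  set p := stackLoopA s [] ((s.length : Int) - (kN : Int)) with hp
  simp only [List.length_nil, Nat.cast_zero, zero_add] at hlen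
  have htoNat : (p.2.toNat : Int) = p.2 := Int.toNat_of_nonneg hnn
  have hplen : p.1.length = kN + p.2.toNat := by omega
  have hrevlen : p.1.reverse.length = kN + p.2.toNat := by simp [hplen]
  show PySem.List.slice (if p.2 ≠ 0 then PySem.List.slice p.1.reverse none (some (-p.2)) else p.1.reverse)
      none (some (kN : Int)) = (List.drop p.2.toNat p.1).reverse
  by_cases hz : p.2 ≠ 0
  · rw [if_pos hz]
    have hkpos : 0 < p.2.toNat := by omega
    rw [show -p.2 = -((p.2.toNat : Nat) : Int) from by rw [htoNat]]
    rw [PySem.List.slice_to_neg_natCast p.1.reverse p.2.toNat hkpos]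
    rw [PySem.List.slice_to_natCast]
    rw [hrevlen, show kN + p.2.toNat - p.2.toNat = kN from by omega]
    rw [List.take_take, min_self]
    rw [List.reverse_drop, hplen, show kN + p.2.toNat - p.2.toNat = kN from by omega]
  · rw [if_neg hz]
    rw [not_not] at hz
    rw [PySem.List.slice_to_natCast]
    rw [List.take_of_length_le (by omega)]
    rw [show p.2.toNat = 0 from by omega, List.drop_zero]

-- a helper unfolding and getD/getElem bridge used below
theorem pv_stack_cons (c : Char) (cs rst : List Char) (r : Int) :
    stackLoopA (c :: cs) rst r = stackLoopA cs (c :: (popWhileA rst r c).1) (popWhileA rst r c).2 := by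
  rw [stackLoopA]

theorem pv_getD_eq_getElem (s : List Char) (i : Nat) (hi : i < s.length) : s.getD i ' ' = s[i] := by
  simp [List.getD, List.getElem?_eq_getElem hi]

theorem pv_A_eq_G : ∀ (kN : Nat) (s : List Char), kN ≤ s.length → maxSubseqA s (kN : Int) = Gsel s kN := by
  intro kN
  induction kN with
  | zero =>
    intro s h
    rw [pv_resform s 0 (by omega)]
    have hlen := pv_stack_len s [] ((s.length : Int) - ((0 : Nat) : Int))
    have hnn := pv_stack_nonneg s [] ((s.length : Int) - ((0 : Nat) : Int)) (by omega)
    set p := stackLoopA s [] ((s.length : Int) - ((0 : Nat) : Int)) with hp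
    simp only [List.length_nil, Nat.cast_zero, zero_add] at hlen
    rw [List.drop_eq_nil_of_le (by omega : p.1.length ≤ p.2.toNat), List.reverse_nil]
    simp [Gsel]
  | succ k' ih =>
    intro s h
    have hspec := pv_argmax_spec s (s.length - k') (s.length - k') 1 0 (by omega) (by omega) (by omega)
    set m := argmaxFromB s 0 1 (s.length - k') with hm
    obtain ⟨-, hmlt, hP2, hP3⟩ := hspec
    have hmn : m < s.length := by omega
    have hsplit : s.take m ++ s[m] :: s.drop (m + 1) = s := by
      rw [← List.drop_eq_getElem_cons hmn, List.take_append_drop]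
    set r0 : Int := (s.length : Int) - ((k' : Int) + 1) with hr0
    have hr0nn : 0 ≤ r0 := by omega
    set p1 := stackLoopA (s.take m) [] r0 with hp1
    have hlen1 := pv_stack_len (s.take m) [] r0
    have htk : (s.take m).length = m := by simp; omega
    rw [htk] at hlen1
    simp only [List.length_nil, Nat.cast_zero, zero_add] at hlen1
    rw [← hp1] at hlen1
    have hnn1 := pv_stack_nonneg (s.take m) [] r0 hr0nn
    rw [← hp1] at hnn1
    have hmem1 : ∀ x ∈ p1.1, x < s[m] := by
      intro x hx
      rcases pv_stack_mem (s.take m) [] r0 x hx with hx' | hx'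
      · simp at hx'
      · obtain ⟨i, hi, hix⟩ := List.getElem_of_mem hx'
        rw [htk] at hi
        rw [List.getElem_take] at hix
        have := hP3 i (by omega) hi
        rw [pv_getD_eq_getElem s i (by omega), pv_getD_eq_getElem s m hmn] at this
        rw [← hix]
        exact this
    have hle1 : (p1.1.length : Int) ≤ p1.2 := by omega
    have hpop : popWhileA p1.1 p1.2 s[m] = ([], r0 - (m : Int)) := by
      rw [pv_pop_all s[m] p1.1 p1.2 hmem1 hle1]
      congr 1
      omega
    set t := s.drop (m + 1) with ht
    have htlen : t.length = s.length - (m + 1) := by simp [ht]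
    set pI := stackLoopA t [] (r0 - (m : Int)) with hpI
    have hlenI := pv_stack_len t [] (r0 - (m : Int))
    rw [htlen] at hlenI
    simp only [List.length_nil, Nat.cast_zero, zero_add] at hlenI
    rw [← hpI, Nat.cast_sub (by omega : m + 1 ≤ s.length)] at hlenI
    have hnnI := pv_stack_nonneg t [] (r0 - (m : Int)) (by omega)
    rw [← hpI] at hnnI
    have hbot := pv_stack_bottom s[m] t [] (r0 - (m : Int)) (by omega) (by
      intro j c' hj hle
      rw [ht, List.getElem?_drop] at hj
      have hidx : m + 1 + j < s.length := by
        by_contra hcon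
        rw [List.getElem?_eq_none (by omega)] at hj
        simp at hj
      rw [List.getElem?_eq_getElem hidx] at hj
      have hc' : c' = s[m + 1 + j] := (Option.some.inj hj).symm
      simp only [List.length_nil, Nat.cast_zero, zero_add] at hle
      have hwin : m + 1 + j < s.length - k' := by omega
      have hle2 := hP2 (m + 1 + j) (by omega)
      rw [pv_getD_eq_getElem s _ hidx, pv_getD_eq_getElem s m hmn] at hle2
      rw [hc']
      exact not_lt.mpr hle2)
    have hrun : stackLoopA s [] r0 = (pI.1 ++ [s[m]], pI.2) := by
      conv_lhs => rw [← hsplit]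
      rw [pv_stack_concat, ← hp1, pv_stack_cons, hpop]
      simp only []
      rw [show (s[m] :: ([] : List Char)) = [] ++ [s[m]] from rfl]
      exact hbot
    rw [pv_resform s (k' + 1) h]
    have hcast : (s.length : Int) - (((k' + 1 : Nat)) : Int) = r0 := by push_cast; omega
    rw [hcast, hrun]
    have hIto : (pI.2.toNat : Int) = pI.2 := Int.toNat_of_nonneg hnnI
    have hdle : pI.2.toNat ≤ pI.1.length := by omega
    rw [List.drop_append_of_le_length hdle, List.reverse_append]
    simp only [List.reverse_cons, List.reverse_nil, List.nil_append, List.singleton_append]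
    have hG : Gsel s (k' + 1) = s.getD m ' ' :: Gsel t k' := by
      simp only [Gsel]
      rw [← hm, ← ht]
    rw [hG, pv_getD_eq_getElem s m hmn]
    congr 1
    have hres := pv_resform t k' (by omega : k' ≤ t.length)
    have hcast2 : (t.length : Int) - ((k' : Nat) : Int) = r0 - (m : Int) := by
      rw [htlen, Nat.cast_sub (by omega : m + 1 ≤ s.length)]; push_cast; omega
    rw [hcast2, ← hpI] at hres
    rw [← hres]
    exact ih t (by omega)

theorem pv_core (s : List Char) (k : Int) (h1 : 1 ≤ k) (h2 : k ≤ (s.length : Int)) :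
    maxSubseqA s k = maxSubseqB s k := by
  have hk : ((k.toNat : Nat) : Int) = k := Int.toNat_of_nonneg (by omega)
  have hle : k.toNat ≤ s.length := by omega
  rw [← hk, pv_A_eq_G k.toNat s hle, pv_B_eq_G s k.toNat hle]

theorem pv_foldl_sum (l : List (Int × String × Int)) (t0 : Int) :
    l.foldl (fun t v => t + v.2.2) t0 = t0 + (l.map (fun v => v.2.2)).sum := by
  induction l generalizing t0 with
  | nil => simp
  | cons v l ih =>
    simp only [List.foldl_cons, List.map_cons, List.sum_cons]
    rw [ih]
    ring

theorem pv_outer (k : Int) : ∀ (ps : List (Int × String)) (t0 : Int) (v0 : List (Int × String × Int)),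
    (∀ p ∈ ps, (PySem.Str.strip p.2).toList = [] ∨
      (((PySem.Str.strip p.2).toList.all Char.isDigit) = true ∧ 1 ≤ k ∧ k ≤ (((PySem.Str.strip p.2).toList.length : Nat) : Int))) →
    ps.foldl (lineStepA k) (t0, v0) =
      (t0 + ((ps.filterMap (lineValB k)).map (fun v => v.2.2)).sum, v0 ++ ps.filterMap (lineValB k)) := by
  intro ps
  induction ps with
  | nil => intro t0 v0 _; simp
  | cons p ps ih =>
    intro t0 v0 H
    have Hp := H p (by simp)
    have Hps : ∀ q ∈ ps, (PySem.Str.strip q.2).toList = [] ∨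
        (((PySem.Str.strip q.2).toList.all Char.isDigit) = true ∧ 1 ≤ k ∧ k ≤ (((PySem.Str.strip q.2).toList.length : Nat) : Int)) :=
      fun q hq => H q (by simp [hq])
    simp only [List.foldl_cons, List.filterMap_cons]
    by_cases hs : (PySem.Str.strip p.2).toList = []
    · rw [show lineStepA k (t0, v0) p = (t0, v0) from by simp only [lineStepA]; rw [if_pos hs],
        show lineValB k p = none from by simp only [lineValB]; rw [if_pos hs]]
      exact ih t0 v0 Hps
    · rcases Hp with h | ⟨-, hk1, hk2⟩
      · exact absurd h hs
      have hcore := pv_core (PySem.Str.strip p.2).toList k hk1 hk2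
      rw [show lineStepA k (t0, v0) p =
            (t0 + (PySem.Int.ofChars? (maxSubseqB (PySem.Str.strip p.2).toList k)).getD 0,
              v0 ++ [(p.1, String.ofList (maxSubseqB (PySem.Str.strip p.2).toList k),
                (PySem.Int.ofChars? (maxSubseqB (PySem.Str.strip p.2).toList k)).getD 0)]) from by
          simp only [lineStepA]; rw [if_neg hs, hcore]]
      rw [show lineValB k p = some (p.1, String.ofList (maxSubseqB (PySem.Str.strip p.2).toList k),
            (PySem.Int.ofChars? (maxSubseqB (PySem.Str.strip p.2).toList k)).getD 0) from by
          simp only [lineValB]; rw [if_neg hs]]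
      rw [ih _ _ Hps]
      simp [add_assoc]

theorem pv_main (lines : List String) (k : Int) (hPre : Pre_sumar_joltages_por_banco lines k) :
    sumar_joltages_por_banco lines k = sumar_joltages_por_banco_alt lines k := by
  simp only [sumar_joltages_por_banco, sumar_joltages_por_banco_alt]
  have H : ∀ p ∈ PySem.List.enumerate lines 1, (PySem.Str.strip p.2).toList = [] ∨
      (((PySem.Str.strip p.2).toList.all Char.isDigit) = true ∧ 1 ≤ k ∧ k ≤ (((PySem.Str.strip p.2).toList.length : Nat) : Int)) := by
    intro p hp
    rcases (PySem.List.mem_enumerate_iff lines 1 p).mp hp with ⟨j, hj, rfl⟩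
    exact hPre lines[j] (lines.getElem_mem hj)
  rw [pv_outer k _ 0 [] H, pv_foldl_sum]
  simp


-- ===== VERDICT (by name: the statement is the Claim_ definition above) =====
theorem sumar_joltages_por_banco_spec : Claim_equal_sumar_joltages_por_banco := by
  intro lines k _ hPre
  unfold Spec_sumar_joltages_por_banco
  exact pv_main lines k hPre
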